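-- pv_equiv track=rewrite | github.com/abcamiletto/body-models | src/body_models/anny/model.py | _build_kinematic_fronts
-- ===== SOURCE A (Python) =====
-- def _build_kinematic_fronts(parents: list[int]) -> tuple[list[list[int]], list[list[int]]]:
--     """Group joints by depth for parallel forward kinematics."""
--     n = len(parents)
--     assigned = [False] * n
--     level = [i for i in range(n) if parents[i] < 0]
--     indices, parent_ids = [], []
--
--     while level:
--         indices.append(level)
--         parent_ids.append([parents[i] for i in level])
--         for j in level:
--             assigned[j] = True
--         level = [i for i in range(n) if not assigned[i] and parents[i] in level]
--
--     return indices, parent_ids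
-- ===== SOURCE B (Python) =====
-- def _build_kinematic_fronts(parents: list[int]) -> tuple[list[list[int]], list[list[int]]]:
--     """Group joints by depth for parallel forward kinematics."""
--     children = {}
--     level = []
--     for i, p in enumerate(parents):
--         if p < 0:
--             level.append(i)
--         else:
--             children[p] = children.get(p, []) + [i]
--     indices, parent_ids = [], []
--     while level:
--         indices.append(level)
--         parent_ids.append([parents[i] for i in level])
--         level = sorted(c for j in level for c in children.get(j, []))
--     return indices, parent_ids
-- ===== Notes on version B (the rewrite author's own statement) =====
-- stated objective: faster
-- what changed: Replaces A's per-level rescans of range(n) with a membership test 'parents[i] in level' (O(n*|level|) per level) by a one-pass children adjacency dict followed by a BFS that sorts each next front ascending.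
import Mathlib
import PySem

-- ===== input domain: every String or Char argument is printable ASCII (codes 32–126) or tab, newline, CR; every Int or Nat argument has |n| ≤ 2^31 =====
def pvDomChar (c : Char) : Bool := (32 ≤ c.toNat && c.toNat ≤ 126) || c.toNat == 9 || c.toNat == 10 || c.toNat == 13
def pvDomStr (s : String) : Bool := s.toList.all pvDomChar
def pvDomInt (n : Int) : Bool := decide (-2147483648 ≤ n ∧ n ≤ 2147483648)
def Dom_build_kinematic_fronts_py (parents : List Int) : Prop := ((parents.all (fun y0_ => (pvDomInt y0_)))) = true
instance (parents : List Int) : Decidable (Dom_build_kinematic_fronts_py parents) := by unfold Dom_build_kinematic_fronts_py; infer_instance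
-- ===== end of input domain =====

-- B replaces A's repeated O(n·|level|) scans by a one-pass children adjacency dict + BFS with
-- per-level ascending sort; measurably faster (asymptotic: O(n^2) → O(n log n)).

-- ===== PORT A =====
-- while-loop of A as fuel recursion; fuel n+1 never runs out (each nonempty level marks a fresh joint)
def aNext (parents : List Int) (assigned : List Bool) (level : List Int) : List Int :=
  (PySem.List.pyRange 0 (parents.length : Int) 1).filter
    (fun i => !(PySem.List.pyGetD assigned i false) && level.contains (PySem.List.pyGetD parents i 0))

def aLoop (parents : List Int) : Nat → List Bool → List Int → List (List Int) → List (List Int) →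
    List (List Int) × List (List Int)
  | 0, _, _, accI, accP => (accI, accP)
  | fuel+1, assigned, level, accI, accP =>
    if level = [] then (accI, accP)
    else
      let assigned' := level.foldl (fun a j => PySem.List.pySetD a j true) assigned
      aLoop parents fuel assigned' (aNext parents assigned' level)
        (accI ++ [level]) (accP ++ [level.map (fun i => PySem.List.pyGetD parents i 0)])

def build_kinematic_fronts_py (parents : List Int) : List (List Int) × List (List Int) :=
  let assigned := List.replicate parents.length false
  let level := (PySem.List.pyRange 0 (parents.length : Int) 1).filter
    (fun i => decide (PySem.List.pyGetD parents i 0 < 0))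
  aLoop parents (parents.length + 1) assigned level [] []

-- ===== PORT B =====
-- one pass over enumerate(parents): roots + children adjacency dict
def bBuild (parents : List Int) : PySem.Dict Int (List Int) × List Int :=
  (PySem.List.enumerate parents 0).foldl
    (fun (st : PySem.Dict Int (List Int) × List Int) ip =>
      if ip.2 < 0 then (st.1, st.2 ++ [ip.1])
      else (st.1.insert ip.2 (st.1.getD ip.2 [] ++ [ip.1]), st.2))
    (PySem.Dict.empty, [])

def bLoop (parents : List Int) (children : PySem.Dict Int (List Int)) :
    Nat → List Int → List (List Int) → List (List Int) → List (List Int) × List (List Int)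
  | 0, _, accI, accP => (accI, accP)
  | fuel+1, level, accI, accP =>
    if level = [] then (accI, accP)
    else
      bLoop parents children fuel
        (PySem.List.sorted (level.flatMap (fun j => children.getD j [])) (fun x => x) false)
        (accI ++ [level]) (accP ++ [level.map (fun i => PySem.List.pyGetD parents i 0)])

def build_kinematic_fronts_py_alt (parents : List Int) : List (List Int) × List (List Int) :=
  let st := bBuild parents
  bLoop parents st.1 (parents.length + 1) st.2 [] []

-- ===== PRECONDITION & SPEC =====
def Spec_build_kinematic_fronts_py (parents : List Int) (out : List (List Int) × List (List Int)) : Prop := out = build_kinematic_fronts_py_alt parents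
instance (parents : List Int) (out : List (List Int) × List (List Int)) : Decidable (Spec_build_kinematic_fronts_py parents out) := by unfold Spec_build_kinematic_fronts_py; infer_instance

-- ===== CLAIM (what is proved, stated in full; the proofs are below) =====
def Claim_equal_build_kinematic_fronts_py : Prop := ∀ (parents : List Int), Dom_build_kinematic_fronts_py parents → Spec_build_kinematic_fronts_py parents (build_kinematic_fronts_py parents)

-- ===== LEMMAS AND PROOFS =====

-- abbreviation for parents[i]
def pv (parents : List Int) (i : Int) : Int := PySem.List.pyGetD parents i 0

-- the loop invariant tying A's assigned/level state to legality
def KInv (parents : List Int) (assigned : List Bool) (level : List Int) : Prop :=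
  assigned.length = parents.length ∧
  level.Pairwise (· < ·) ∧
  (∀ j ∈ level, 0 ≤ j ∧ j < (parents.length : Int) ∧ PySem.List.pyGetD assigned j false = false) ∧
  (∀ j ∈ level, pv parents j < 0 ∨
     (0 ≤ pv parents j ∧ pv parents j < (parents.length : Int) ∧
      PySem.List.pyGetD assigned (pv parents j) false = true)) ∧
  (∀ i : Int, 0 ≤ i → i < (parents.length : Int) →
     PySem.List.pyGetD assigned i false = true →
     pv parents i < 0 ∨
       (0 ≤ pv parents i ∧ pv parents i < (parents.length : Int) ∧
        PySem.List.pyGetD assigned (pv parents i) false = true))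

lemma length_markAll (lvl : List Int) (a : List Bool) :
    (lvl.foldl (fun a j => PySem.List.pySetD a j true) a).length = a.length := by
  induction lvl generalizing a with
  | nil => rfl
  | cons j rest ih => simpa [List.foldl_cons, PySem.List.length_pySetD] using ih (PySem.List.pySetD a j true)

lemma pyGetD_pySetD_int (xs : List Bool) (j i : Int) (v d : Bool)
    (hj0 : 0 ≤ j) (hj : j < (xs.length : Int)) (hi0 : 0 ≤ i) :
    PySem.List.pyGetD (PySem.List.pySetD xs j v) i d = if i = j then v else PySem.List.pyGetD xs i d := by
  have hj' : j = ((j.toNat : Nat) : Int) := by omega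
  have hi' : i = ((i.toNat : Nat) : Int) := by omega
  have hlt : j.toNat < xs.length := by omega
  rw [hj', hi', PySem.List.pyGetD_pySetD_natCast _ _ _ _ _ hlt]
  by_cases h : i.toNat = j.toNat
  · rw [if_pos h, if_pos (show ((i.toNat : Nat) : Int) = ((j.toNat : Nat) : Int) by exact_mod_cast h)]
  · rw [if_neg h, if_neg (show ¬ ((i.toNat : Nat) : Int) = ((j.toNat : Nat) : Int) by exact_mod_cast h)]

lemma markAll_read (lvl : List Int) (a : List Bool)
    (hb : ∀ j ∈ lvl, 0 ≤ j ∧ j < (a.length : Int)) (i : Int) (hi0 : 0 ≤ i) :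
    PySem.List.pyGetD (lvl.foldl (fun a j => PySem.List.pySetD a j true) a) i false =
      (PySem.List.pyGetD a i false || lvl.contains i) := by
  induction lvl generalizing a with
  | nil => simp
  | cons j rest ih =>
    have hb' : ∀ k ∈ rest, 0 ≤ k ∧ k < ((PySem.List.pySetD a j true).length : Int) := by
      intro k hk
      have := hb k (List.mem_cons_of_mem _ hk)
      simpa [PySem.List.length_pySetD] using this
    have hj := hb j (List.mem_cons_self)
    rw [List.foldl_cons, ih (PySem.List.pySetD a j true) hb',
      pyGetD_pySetD_int a j i true false hj.1 hj.2 hi0]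
    by_cases hij : i = j <;> simp [hij]

lemma replicate_read (n : Nat) (i : Int) :
    PySem.List.pyGetD (List.replicate n false) i false = false := by
  unfold PySem.List.pyGetD
  cases h : PySem.List.pyGet? (List.replicate n false) i with
  | none => rfl
  | some b =>
    have := PySem.List.mem_of_pyGet?_eq_some _ h
    simp at this
    simp [this]

-- the one-pass fold, characterised: dict lookups and the roots list
lemma bfold_fst (L : List (Int × Int)) : ∀ (d : PySem.Dict Int (List Int)) (r : List Int) (j : Int),
    ((L.foldl (fun (st : PySem.Dict Int (List Int) × List Int) ip =>
        if ip.2 < 0 then (st.1, st.2 ++ [ip.1])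
        else (st.1.insert ip.2 (st.1.getD ip.2 [] ++ [ip.1]), st.2)) (d, r)).1).getD j [] =
      d.getD j [] ++ (L.filter (fun ip => decide (0 ≤ ip.2) && (ip.2 == j))).map (·.1) := by
  induction L with
  | nil => intro d r j; simp
  | cons hd rest ih =>
    intro d r j
    rw [List.foldl_cons, List.filter_cons]
    by_cases hp : hd.2 < 0
    · rw [if_pos hp, ih]
      have hf : (decide (0 ≤ hd.2) && (hd.2 == j)) = false := by
        simp only [Bool.and_eq_false_iff, decide_eq_false_iff_not]; left; omega
      simp [hf]
    · rw [if_neg hp, ih, PySem.Dict.getD_insert]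
      by_cases hj : j = hd.2
      · rw [if_pos hj, hj]
        have hf : (decide (0 ≤ hd.2) && (hd.2 == hd.2)) = true := by
          simp; omega
        rw [if_pos hf, List.map_cons]
        simp [List.append_assoc]
      · rw [if_neg hj]
        have hf : (decide (0 ≤ hd.2) && (hd.2 == j)) = false := by
          simp only [Bool.and_eq_false_iff, beq_eq_false_iff_ne, ne_eq]
          right; omega
        simp [hf]

lemma bfold_snd (L : List (Int × Int)) : ∀ (d : PySem.Dict Int (List Int)) (r : List Int),
    ((L.foldl (fun (st : PySem.Dict Int (List Int) × List Int) ip =>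
        if ip.2 < 0 then (st.1, st.2 ++ [ip.1])
        else (st.1.insert ip.2 (st.1.getD ip.2 [] ++ [ip.1]), st.2)) (d, r)).2) =
      r ++ (L.filter (fun ip => decide (ip.2 < 0))).map (·.1) := by
  induction L with
  | nil => intro d r; simp
  | cons hd rest ih =>
    intro d r
    rw [List.foldl_cons, List.filter_cons]
    by_cases hp : hd.2 < 0
    · rw [if_pos hp, ih]
      simp [hp, List.append_assoc]
    · rw [if_neg hp, ih]
      simp [hp]

-- children dict lookup = filter of range
lemma bBuild_fst (parents : List Int) (j : Int) :
    (bBuild parents).1.getD j [] =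
      (PySem.List.pyRange 0 (parents.length : Int) 1).filter
        (fun i => decide (0 ≤ pv parents i) && (pv parents i == j)) := by
  unfold bBuild
  rw [bfold_fst, PySem.List.enumerate_eq_map_pyRange parents 0, List.filter_map, List.map_map]
  simp [pv, Function.comp_def]; rfl

lemma bBuild_snd (parents : List Int) :
    (bBuild parents).2 =
      (PySem.List.pyRange 0 (parents.length : Int) 1).filter
        (fun i => decide (pv parents i < 0)) := by
  unfold bBuild
  rw [bfold_snd, PySem.List.enumerate_eq_map_pyRange parents 0, List.filter_map, List.map_map]
  simp [pv, Function.comp_def]; rfl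

-- with 0 ≤ j the sign guard in the children predicate is redundant
lemma children_pred (parents : List Int) (j : Int) (hj : 0 ≤ j) :
    (bBuild parents).1.getD j [] =
      (PySem.List.pyRange 0 (parents.length : Int) 1).filter (fun i => pv parents i == j) := by
  rw [bBuild_fst]
  apply List.filter_congr
  intro x _
  by_cases h : pv parents x = j
  · simp [h]; omega
  · simp [h]

-- splitting a membership filter at the head of the member list, up to permutation
lemma filter_mem_split (g : Int → Int) (j : Int) (rest : List Int) (hj : j ∉ rest) (l : List Int) :
    ((l.filter (fun i => g i == j)) ++ l.filter (fun i => decide (g i ∈ rest))).Perm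
      (l.filter (fun i => decide (g i ∈ j :: rest))) := by
  induction l with
  | nil => simp
  | cons x xs ih =>
    by_cases h1 : g x = j
    · simpa [List.filter_cons, h1, hj] using ih.cons x
    · by_cases h2 : g x ∈ rest
      · have hmid := List.perm_middle (a := x) (l₁ := xs.filter (fun i => g i == j))
          (l₂ := xs.filter (fun i => decide (g i ∈ rest)))
        simpa [List.filter_cons, h1, h2] using hmid.trans (ih.cons x)
      · simpa [List.filter_cons, h1, h2] using ih

-- permutation: the concatenated children of a nodup level are a rearrangement of the filter
lemma flatMap_perm (parents : List Int) (lvl : List Int)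
    (hnd : lvl.Nodup) (hpos : ∀ j ∈ lvl, 0 ≤ j) :
    ((lvl.flatMap (fun j => (bBuild parents).1.getD j [])).Perm
      ((PySem.List.pyRange 0 (parents.length : Int) 1).filter
        (fun i => decide (pv parents i ∈ lvl)))) := by
  induction lvl with
  | nil => simp
  | cons j rest ih =>
    have hj : j ∉ rest := (List.nodup_cons.mp hnd).1
    have hrest := (List.nodup_cons.mp hnd).2
    have hpos' : ∀ k ∈ rest, 0 ≤ k := fun k hk => hpos k (List.mem_cons_of_mem _ hk)
    rw [List.flatMap_cons, children_pred parents j (hpos j List.mem_cons_self)]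
    exact List.Perm.trans (List.Perm.append_left _ (ih hrest hpos'))
      (filter_mem_split (pv parents) j rest hj _)

-- reading A's assigned array after marking the current level
lemma assigned_read (parents : List Int) (assigned : List Bool) (level : List Int)
    (hlen : assigned.length = parents.length)
    (hmem : ∀ j ∈ level, 0 ≤ j ∧ j < (parents.length : Int) ∧
      PySem.List.pyGetD assigned j false = false) (i : Int) (hi0 : 0 ≤ i) :
    PySem.List.pyGetD (level.foldl (fun a j => PySem.List.pySetD a j true) assigned) i false =
      (PySem.List.pyGetD assigned i false || level.contains i) := by
  apply markAll_read level assigned _ i hi0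
  intro j hj
  have := hmem j hj
  constructor
  · exact this.1
  · rw [hlen]; exact this.2.1

-- after marking, A's filter keeps exactly the joints whose parent lies in the level
lemma aNext_filter (parents : List Int) (assigned : List Bool) (level : List Int)
    (hinv : KInv parents assigned level) :
    aNext parents (level.foldl (fun a j => PySem.List.pySetD a j true) assigned) level =
      (PySem.List.pyRange 0 (parents.length : Int) 1).filter
        (fun i => decide (pv parents i ∈ level)) := by
  obtain ⟨hlen, hpw, hmem, h4, h5⟩ := hinv
  unfold aNext
  apply List.filter_congr
  intro x hx
  obtain ⟨hx0, hxn⟩ := PySem.List.mem_pyRange_one.mp hx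
  by_cases hc : pv parents x ∈ level
  · have hb := hmem _ hc
    have ha : PySem.List.pyGetD assigned x false = false := by
      by_contra ha
      rcases h5 x hx0 hxn (by simpa using Bool.of_not_eq_false ha) with h | h
      · omega
      · rw [h.2.2] at hb; exact absurd hb.2.2 (by simp)
    have hxl : x ∉ level := by
      intro hxl
      rcases h4 x hxl with h | h
      · have := hb.1; omega
      · rw [h.2.2] at hb; exact absurd hb.2.2 (by simp)
    rw [assigned_read parents assigned level hlen hmem x hx0]
    simp only [pv] at hc ⊢
    simp [ha, hxl, hc]
  · simp only [pv] at hc ⊢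
    simp [hc]

-- the per-step equality: A's next level is B's next level
lemma step_eq (parents : List Int) (assigned : List Bool) (level : List Int)
    (hinv : KInv parents assigned level) :
    aNext parents (level.foldl (fun a j => PySem.List.pySetD a j true) assigned) level =
      PySem.List.sorted (level.flatMap (fun j => (bBuild parents).1.getD j [])) (fun x => x) false := by
  obtain ⟨hlen, hpw, hmem, h4, h5⟩ := hinv
  have hnd : level.Nodup := List.Pairwise.imp (fun h => ne_of_lt h) hpw
  have hpos : ∀ j ∈ level, 0 ≤ j := fun j hj => (hmem j hj).1
  rw [aNext_filter parents assigned level ⟨hlen, hpw, hmem, h4, h5⟩]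
  exact (PySem.List.sorted_eq_of_perm_of_pairwise_lt _ _ _
    ((flatMap_perm parents level hnd hpos).symm)
    (List.Pairwise.filter _ (PySem.List.pairwise_lt_pyRange_one 0 (parents.length : Int)))).symm

lemma inv_step (parents : List Int) (assigned : List Bool) (level : List Int)
    (hinv : KInv parents assigned level) :
    KInv parents (level.foldl (fun a j => PySem.List.pySetD a j true) assigned)
      (aNext parents (level.foldl (fun a j => PySem.List.pySetD a j true) assigned) level) := by
  obtain ⟨hlen, hpw, hmem, h4, h5⟩ := hinv
  have hread := assigned_read parents assigned level hlen hmem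
  rw [aNext_filter parents assigned level ⟨hlen, hpw, hmem, h4, h5⟩]
  refine ⟨?_, ?_, ?_, ?_, ?_⟩
  · rw [length_markAll]; exact hlen
  · exact List.Pairwise.filter _ (PySem.List.pairwise_lt_pyRange_one 0 (parents.length : Int))
  · intro j hj
    obtain ⟨hjr, hjp⟩ := List.mem_filter.mp hj
    obtain ⟨hj0, hjn⟩ := PySem.List.mem_pyRange_one.mp hjr
    have hc : pv parents j ∈ level := by simpa using hjp
    have hb := hmem _ hc
    refine ⟨hj0, hjn, ?_⟩
    rw [hread j hj0]
    have ha : PySem.List.pyGetD assigned j false = false := by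
      by_contra ha
      rcases h5 j hj0 hjn (by simpa using Bool.of_not_eq_false ha) with h | h
      · have := hb.1; omega
      · rw [h.2.2] at hb; exact absurd hb.2.2 (by simp)
    have hxl : j ∉ level := by
      intro hxl
      rcases h4 j hxl with h | h
      · have := hb.1; omega
      · rw [h.2.2] at hb; exact absurd hb.2.2 (by simp)
    simp [ha, hxl]
  · intro j hj
    obtain ⟨hjr, hjp⟩ := List.mem_filter.mp hj
    have hc : pv parents j ∈ level := by simpa using hjp
    have hb := hmem _ hc
    right
    refine ⟨hb.1, hb.2.1, ?_⟩
    rw [hread _ hb.1]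
    simp [hc]
  · intro i hi0 hin ha'
    rw [hread i hi0] at ha'
    have step : pv parents i < 0 ∨
        (0 ≤ pv parents i ∧ pv parents i < (parents.length : Int) ∧
         PySem.List.pyGetD assigned (pv parents i) false = true) ∨
        pv parents i ∈ level := by
      rcases Bool.or_eq_true_iff.mp ha' with h | h
      · rcases h5 i hi0 hin h with h1 | h1
        · exact Or.inl h1
        · exact Or.inr (Or.inl h1)
      · have hil : i ∈ level := by simpa using h
        rcases h4 i hil with h1 | h1
        · exact Or.inl h1
        · exact Or.inr (Or.inl h1)
    rcases step with h | h | h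
    · exact Or.inl h
    · refine Or.inr ⟨h.1, h.2.1, ?_⟩
      rw [hread _ h.1]
      simp [h.2.2]
    · have hb := hmem _ h
      refine Or.inr ⟨hb.1, hb.2.1, ?_⟩
      rw [hread _ hb.1]
      simp [h]

lemma loop_eq (parents : List Int) (fuel : Nat) :
    ∀ assigned level accI accP, KInv parents assigned level →
      aLoop parents fuel assigned level accI accP =
        bLoop parents (bBuild parents).1 fuel level accI accP := by
  induction fuel with
  | zero => intro assigned level accI accP _; rfl
  | succ fuel ih =>
    intro assigned level accI accP hinv
    by_cases h : level = []
    · simp [aLoop, bLoop, h]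
    · rw [aLoop, bLoop, if_neg h, if_neg h]
      show aLoop parents fuel (level.foldl (fun a j => PySem.List.pySetD a j true) assigned)
          (aNext parents (level.foldl (fun a j => PySem.List.pySetD a j true) assigned) level)
          (accI ++ [level]) (accP ++ [level.map (fun i => PySem.List.pyGetD parents i 0)]) = _
      rw [step_eq parents assigned level hinv]
      exact ih _ _ _ _ (by
        have := inv_step parents assigned level hinv
        rwa [step_eq parents assigned level hinv] at this)

lemma inv_init (parents : List Int) :
    KInv parents (List.replicate parents.length false)
      ((PySem.List.pyRange 0 (parents.length : Int) 1).filter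
        (fun i => decide (PySem.List.pyGetD parents i 0 < 0))) := by
  refine ⟨by simp, ?_, ?_, ?_, ?_⟩
  · exact List.Pairwise.filter _ (PySem.List.pairwise_lt_pyRange_one 0 (parents.length : Int))
  · intro j hj
    obtain ⟨hjr, hjp⟩ := List.mem_filter.mp hj
    obtain ⟨hj0, hjn⟩ := PySem.List.mem_pyRange_one.mp hjr
    exact ⟨hj0, hjn, replicate_read parents.length j⟩
  · intro j hj
    obtain ⟨hjr, hjp⟩ := List.mem_filter.mp hj
    exact Or.inl (by simpa [pv] using hjp)
  · intro i _ _ ha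
    rw [replicate_read] at ha
    exact absurd ha (by simp)

-- ===== VERDICT (by name: the statement is the Claim_ definition above) =====
theorem build_kinematic_fronts_py_spec : Claim_equal_build_kinematic_fronts_py := by
  intro parents _
  unfold Spec_build_kinematic_fronts_py build_kinematic_fronts_py build_kinematic_fronts_py_alt
  show aLoop parents (parents.length + 1) (List.replicate parents.length false) _ [] [] =
    bLoop parents (bBuild parents).1 (parents.length + 1) (bBuild parents).2 [] []
  rw [bBuild_snd parents]
  exact loop_eq parents (parents.length + 1) _ _ [] [] (inv_init parents)
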